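-- pv_equiv track=rewrite | github.com/mihoku/advent-of-code-2022 | Day 3/solution.py | PriorityContent
-- ===== SOURCE A (Python) =====
-- def PriorityContent(c):
--   compartment_length = int(len(c)/2)
--   compartment_a = c[0:compartment_length]
--   compartment_b = c[compartment_length:]
--   text = ''
--   for abc in compartment_a:
--     if abc in compartment_b:
--       text = abc
--   return text
-- ===== SOURCE B (Python) =====
-- def PriorityContent(c):
--   compartment_length = len(c) // 2
--   second = set(c[compartment_length:])
--   for abc in reversed(c[:compartment_length]):
--     if abc in second:
--       return abc
--   return ''
-- ===== Notes on version B (the rewrite author's own statement) =====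
-- stated objective: alternative
-- what changed: Replaces the forward scan that overwrites an accumulator with each match by a backward scan over the first half that returns at the first hit, with the second half's characters held in a set for O(1) membership.
import Mathlib
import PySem

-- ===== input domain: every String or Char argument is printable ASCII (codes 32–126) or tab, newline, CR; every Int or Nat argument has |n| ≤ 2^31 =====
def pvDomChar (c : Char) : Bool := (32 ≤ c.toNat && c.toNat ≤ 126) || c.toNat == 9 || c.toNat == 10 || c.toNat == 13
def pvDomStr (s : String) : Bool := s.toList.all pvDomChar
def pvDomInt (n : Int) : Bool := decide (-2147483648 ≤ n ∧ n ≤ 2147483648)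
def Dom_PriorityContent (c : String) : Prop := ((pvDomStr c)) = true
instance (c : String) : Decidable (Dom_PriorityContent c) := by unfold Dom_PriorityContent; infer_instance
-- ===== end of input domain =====

-- B replaces A's forward scan with accumulator overwrite by a backward first-hit scan over a set of the second half (alternative decomposition).


-- ===== PORT A =====
-- slices c[0:k] / c[k:] with 0 ≤ k ≤ len are exactly take/drop
def PriorityContent (c : String) : String :=
  let cs := c.toList
  let compartmentLength := cs.length / 2
  let compartmentA := cs.take compartmentLength
  let compartmentB := cs.drop compartmentLength
  compartmentA.foldl (fun text abc => if compartmentB.contains abc then String.mk [abc] else text) ""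

-- ===== PORT B =====
-- the loop with early return is List.find? over the reversed first half
def PriorityContent_alt (c : String) : String :=
  let cs := c.toList
  let compartmentLength := cs.length / 2
  let second := PySem.Set.ofList (cs.drop compartmentLength)
  match (cs.take compartmentLength).reverse.find? (fun abc => PySem.Set.contains second abc) with
  | some abc => String.mk [abc]
  | none => ""

-- ===== PRECONDITION & SPEC =====
def Spec_PriorityContent (c : String) (out : String) : Prop := out = PriorityContent_alt c
instance (c : String) (out : String) : Decidable (Spec_PriorityContent c out) := by unfold Spec_PriorityContent; infer_instance

-- ===== CLAIM (what is proved, stated in full; the proofs are below) =====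
def Claim_equal_PriorityContent : Prop := ∀ (c : String), Dom_PriorityContent c → Spec_PriorityContent c (PriorityContent c)

-- ===== LEMMAS AND PROOFS =====

-- the last forward match is the first backward match
theorem foldl_last_match {α β : Type} (p : α → Bool) (f : α → β) :
    ∀ (l : List α) (init : β),
      l.foldl (fun t ch => if p ch then f ch else t) init =
      (match l.reverse.find? p with | some ch => f ch | none => init) := by
  intro l
  induction l with
  | nil => intro init; simp
  | cons a tl ih =>
    intro init
    simp only [List.foldl_cons, List.reverse_cons, List.find?_append]
    rw [ih]
    cases h : tl.reverse.find? p with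
    | some ch => simp
    | none =>
      simp only [Option.none_or, List.find?_singleton]
      by_cases hp : p a = true <;> simp [hp]

theorem set_contains_drop (cb : List Char) (abc : Char) :
    PySem.Set.contains (PySem.Set.ofList cb) abc = cb.contains abc := by
  simp [PySem.Set.contains_eq_listContains, PySem.Set.mem_ofList]

-- ===== VERDICT (by name: the statement is the Claim_ definition above) =====
theorem PriorityContent_spec : Claim_equal_PriorityContent := by
  intro c _
  unfold Spec_PriorityContent PriorityContent PriorityContent_alt
  simp only
  rw [foldl_last_match]
  have hp : (fun abc => PySem.Set.contains (PySem.Set.ofList (c.toList.drop (c.toList.length / 2))) abc)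
      = (c.toList.drop (c.toList.length / 2)).contains := by
    funext x; exact set_contains_drop _ x
  rw [hp]
  cases List.find? (c.toList.drop (c.toList.length / 2)).contains (c.toList.take (c.toList.length / 2)).reverse <;> rfl
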